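-- pv_equiv track=rewrite | github.com/CTRMacdownloads/Gomoku | RL.py | all_lines_with_coords
-- ===== SOURCE A (Python) =====
-- def all_lines_with_coords(board):
--     N = len(board)
--     for r in range(N):
--         yield board[r][:], [(r,c) for c in range(N)]
--     for c in range(N):
--         col = [board[r][c] for r in range(N)]
--         yield col, [(r,c) for r in range(N)]
--     for s in range(-(N-1), N):
--         vals, coords = [], []
--         for r in range(N):
--             c = r - s
--             if 0 <= c < N:
--                 vals.append(board[r][c]); coords.append((r,c))
--         if len(vals) >= 5: yield vals, coords
--     for s in range(0, 2*N-1):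
--         vals, coords = [], []
--         for r in range(N):
--             c = s - r
--             if 0 <= c < N:
--                 vals.append(board[r][c]); coords.append((r,c))
--         if len(vals) >= 5: yield vals, coords
-- ===== SOURCE B (Python) =====
-- def all_lines_with_coords(board):
--     N = len(board)
--     for r in range(N):
--         yield board[r][:], [(r, c) for c in range(N)]
--     cols, diag, anti = {}, {}, {}
--     for r in range(N):
--         for c in range(N):
--             item = (board[r][c], (r, c))
--             cols.setdefault(c, []).append(item)
--             diag.setdefault(r - c, []).append(item)
--             anti.setdefault(r + c, []).append(item)
--     for c in range(N):
--         bucket = cols.get(c, [])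
--         yield [v for v, _ in bucket], [p for _, p in bucket]
--     for s in range(-(N - 1), N):
--         bucket = diag.get(s, [])
--         if len(bucket) >= 5:
--             yield [v for v, _ in bucket], [p for _, p in bucket]
--     for s in range(0, 2 * N - 1):
--         bucket = anti.get(s, [])
--         if len(bucket) >= 5:
--             yield [v for v, _ in bucket], [p for _, p in bucket]
-- ===== Notes on version B (the rewrite author's own statement) =====
-- stated objective: alternative
-- what changed: A re-scans all N rows for every candidate diagonal shift; B does one row-major pass over the grid grouping each cell into three dicts keyed by c, r-c and r+c, then emits the column / diagonal buckets in key order (diagonal buckets gated by length >= 5).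
import Mathlib
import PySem

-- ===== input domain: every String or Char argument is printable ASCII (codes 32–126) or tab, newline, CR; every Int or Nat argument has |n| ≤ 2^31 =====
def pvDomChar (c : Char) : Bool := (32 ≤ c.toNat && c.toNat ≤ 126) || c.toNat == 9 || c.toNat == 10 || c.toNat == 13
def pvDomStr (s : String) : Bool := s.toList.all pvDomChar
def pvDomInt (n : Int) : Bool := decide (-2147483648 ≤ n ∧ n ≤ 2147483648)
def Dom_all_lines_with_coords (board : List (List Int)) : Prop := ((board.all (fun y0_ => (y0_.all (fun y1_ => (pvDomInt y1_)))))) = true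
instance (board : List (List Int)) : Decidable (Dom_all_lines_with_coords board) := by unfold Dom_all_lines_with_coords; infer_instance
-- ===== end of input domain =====

-- B replaces A's two per-diagonal scanning loops by one row-major pass that groups every
-- cell into three dicts (column, r-c diagonal, r+c anti-diagonal) and then emits the buckets
-- (objective: alternative). A is a generator; equivalence is about the sequence of yielded values.

-- ===== PORT A =====
-- board[r] (IndexError totalized with []; Pre_ keeps indices in range)
def pvRowA (board : List (List Int)) (r : Int) : List Int :=
  (PySem.List.pyGet? board r).getD []
-- board[r][c] (IndexError totalized with 0; Pre_ keeps indices in range)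
def pvAtA (board : List (List Int)) (r c : Int) : Int :=
  (PySem.List.pyGet? (pvRowA board r) c).getD 0

-- the inner loop of A's third ('\' diagonals) block, for one shift s
def pvDiagA (board : List (List Int)) (N s : Int) : List Int × List (Int × Int) :=
  (PySem.List.pyRange 0 N 1).foldl (fun p r =>
    let c := r - s
    if 0 ≤ c ∧ c < N then (p.1 ++ [pvAtA board r c], p.2 ++ [(r, c)]) else p) ([], [])

-- the inner loop of A's fourth ('/' anti-diagonals) block, for one shift s
def pvAntiA (board : List (List Int)) (N s : Int) : List Int × List (Int × Int) :=
  (PySem.List.pyRange 0 N 1).foldl (fun p r =>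
    let c := s - r
    if 0 ≤ c ∧ c < N then (p.1 ++ [pvAtA board r c], p.2 ++ [(r, c)]) else p) ([], [])

def all_lines_with_coords (board : List (List Int)) : List (List Int × (List (Int × Int))) :=
  ((PySem.List.pyRange 0 (board.length : Int) 1).map (fun r =>
      (PySem.List.slice (pvRowA board r) none none,
       (PySem.List.pyRange 0 (board.length : Int) 1).map (fun c => (r, c)))))
  ++ ((PySem.List.pyRange 0 (board.length : Int) 1).map (fun c =>
      ((PySem.List.pyRange 0 (board.length : Int) 1).map (fun r => pvAtA board r c),
       (PySem.List.pyRange 0 (board.length : Int) 1).map (fun r => (r, c)))))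
  ++ ((PySem.List.pyRange (-((board.length : Int) - 1)) (board.length : Int) 1).filterMap (fun s =>
        if 5 ≤ (pvDiagA board (board.length : Int) s).1.length
        then some (pvDiagA board (board.length : Int) s) else none))
  ++ ((PySem.List.pyRange 0 (2 * (board.length : Int) - 1) 1).filterMap (fun s =>
        if 5 ≤ (pvAntiA board (board.length : Int) s).1.length
        then some (pvAntiA board (board.length : Int) s) else none))

-- ===== PORT B =====
-- d.setdefault(k, []).append(item)
def pvPut (d : PySem.Dict Int (List (Int × (Int × Int)))) (k : Int) (item : Int × (Int × Int)) :
    PySem.Dict Int (List (Int × (Int × Int))) :=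
  PySem.Dict.modify d k [] (fun b => b ++ [item])

-- ([v for v, _ in bucket], [p for _, p in bucket])
def pvSplit (b : List (Int × (Int × Int))) : List Int × List (Int × Int) :=
  (b.map (·.1), b.map (·.2))

-- B's single grouping pass: one row-major sweep filling the three dicts
def pvBuckets (board : List (List Int)) (N : Int) :
    PySem.Dict Int (List (Int × (Int × Int))) × PySem.Dict Int (List (Int × (Int × Int)))
      × PySem.Dict Int (List (Int × (Int × Int))) :=
  (PySem.List.pyRange 0 N 1).foldl (fun st r =>
    (PySem.List.pyRange 0 N 1).foldl (fun st c =>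
      let item := (pvAtA board r c, (r, c))
      (pvPut st.1 c item, pvPut st.2.1 (r - c) item, pvPut st.2.2 (r + c) item)) st)
    (PySem.Dict.empty, PySem.Dict.empty, PySem.Dict.empty)

def all_lines_with_coords_alt (board : List (List Int)) : List (List Int × (List (Int × Int))) :=
  ((PySem.List.pyRange 0 (board.length : Int) 1).map (fun r =>
      (PySem.List.slice (pvRowA board r) none none,
       (PySem.List.pyRange 0 (board.length : Int) 1).map (fun c => (r, c)))))
  ++ ((PySem.List.pyRange 0 (board.length : Int) 1).map (fun c =>
      pvSplit (PySem.Dict.getD (pvBuckets board (board.length : Int)).1 c [])))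
  ++ ((PySem.List.pyRange (-((board.length : Int) - 1)) (board.length : Int) 1).filterMap (fun s =>
        if 5 ≤ (PySem.Dict.getD (pvBuckets board (board.length : Int)).2.1 s []).length
        then some (pvSplit (PySem.Dict.getD (pvBuckets board (board.length : Int)).2.1 s [])) else none))
  ++ ((PySem.List.pyRange 0 (2 * (board.length : Int) - 1) 1).filterMap (fun s =>
        if 5 ≤ (PySem.Dict.getD (pvBuckets board (board.length : Int)).2.2 s []).length
        then some (pvSplit (PySem.Dict.getD (pvBuckets board (board.length : Int)).2.2 s [])) else none))

-- ===== PRECONDITION & SPEC =====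
-- Pre_: the Python raises IndexError (board[r][c]) exactly when some row is shorter than the board.
def Pre_all_lines_with_coords (board : List (List Int)) : Prop :=
  ∀ row ∈ board, board.length ≤ row.length
instance (board : List (List Int)) : Decidable (Pre_all_lines_with_coords board) := by
  unfold Pre_all_lines_with_coords; infer_instance
def pvWitness_all_lines_with_coords : List (List Int) := [[1, 2], [3, 4]]

def Spec_all_lines_with_coords (board : List (List Int)) (out : List (List Int × (List (Int × Int)))) : Prop := out = all_lines_with_coords_alt board
instance (board : List (List Int)) (out : List (List Int × (List (Int × Int)))) : Decidable (Spec_all_lines_with_coords board out) := by unfold Spec_all_lines_with_coords; infer_instance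

-- ===== CLAIM (what is proved, stated in full; the proofs are below) =====
def Claim_equal_all_lines_with_coords : Prop := ∀ (board : List (List Int)), Dom_all_lines_with_coords board → Pre_all_lines_with_coords board → Spec_all_lines_with_coords board (all_lines_with_coords board)

-- ===== LEMMAS AND PROOFS =====

-- all cells (r, c) of the N×N grid in B's row-major sweep order
def pvCells (N : Int) : List (Int × Int) :=
  (PySem.List.pyRange 0 N 1).flatMap (fun r => (PySem.List.pyRange 0 N 1).map (fun c => (r, c)))

-- one grouping dict, built over an arbitrary cell list
def pvBkt (board : List (List Int)) (key : Int × Int → Int) (l : List (Int × Int)) :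
    PySem.Dict Int (List (Int × (Int × Int))) :=
  l.foldl (fun d rc => pvPut d (key rc) (pvAtA board rc.1 rc.2, rc)) PySem.Dict.empty

lemma pv_foldl_prod3 {A B C D : Type} (l : List A) (f : B → A → B) (g : C → A → C) (k : D → A → D)
    (a : B) (b : C) (c : D) :
    l.foldl (fun st x => (f st.1 x, g st.2.1 x, k st.2.2 x)) (a, b, c)
      = (l.foldl f a, l.foldl g b, l.foldl k c) := by
  rw [PySem.List.foldl_prod_mk f (fun s x => (g s.1 x, k s.2 x)) l a (b, c),
    PySem.List.foldl_prod_mk g k l b c]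

lemma pv_buckets_eq (board : List (List Int)) (N : Int) :
    pvBuckets board N = (pvBkt board (fun rc => rc.2) (pvCells N),
      pvBkt board (fun rc => rc.1 - rc.2) (pvCells N),
      pvBkt board (fun rc => rc.1 + rc.2) (pvCells N)) := by
  unfold pvBuckets pvBkt pvCells
  simp only [List.foldl_flatMap, List.foldl_map]
  have hin : ∀ (st : PySem.Dict Int (List (Int × (Int × Int))) × PySem.Dict Int (List (Int × (Int × Int)))
      × PySem.Dict Int (List (Int × (Int × Int)))) (r : Int),
      (PySem.List.pyRange 0 N 1).foldl (fun st c =>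
        (pvPut st.1 c (pvAtA board r c, (r, c)), pvPut st.2.1 (r - c) (pvAtA board r c, (r, c)),
         pvPut st.2.2 (r + c) (pvAtA board r c, (r, c)))) st
      = ((PySem.List.pyRange 0 N 1).foldl (fun d c => pvPut d c (pvAtA board r c, (r, c))) st.1,
         (PySem.List.pyRange 0 N 1).foldl (fun d c => pvPut d (r - c) (pvAtA board r c, (r, c))) st.2.1,
         (PySem.List.pyRange 0 N 1).foldl (fun d c => pvPut d (r + c) (pvAtA board r c, (r, c))) st.2.2) := by
    intro st r
    exact pv_foldl_prod3 (PySem.List.pyRange 0 N 1)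
      (fun d c => pvPut d c (pvAtA board r c, (r, c)))
      (fun d c => pvPut d (r - c) (pvAtA board r c, (r, c)))
      (fun d c => pvPut d (r + c) (pvAtA board r c, (r, c))) st.1 st.2.1 st.2.2
  simp only [hin]
  exact pv_foldl_prod3 (PySem.List.pyRange 0 N 1)
    (fun d r => (PySem.List.pyRange 0 N 1).foldl (fun d c => pvPut d c (pvAtA board r c, (r, c))) d)
    (fun d r => (PySem.List.pyRange 0 N 1).foldl (fun d c => pvPut d (r - c) (pvAtA board r c, (r, c))) d)
    (fun d r => (PySem.List.pyRange 0 N 1).foldl (fun d c => pvPut d (r + c) (pvAtA board r c, (r, c))) d)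
    PySem.Dict.empty PySem.Dict.empty PySem.Dict.empty

lemma pv_bkt_getD (board : List (List Int)) (key : Int × Int → Int) (l : List (Int × Int)) (s : Int) :
    PySem.Dict.getD (pvBkt board key l) s []
      = (l.filter (fun rc => key rc == s)).map (fun rc => (pvAtA board rc.1 rc.2, rc)) := by
  unfold pvBkt
  have h : l.foldl (fun d rc => pvPut d (key rc) (pvAtA board rc.1 rc.2, rc)) PySem.Dict.empty
      = ((l.map (fun rc => (key rc, (pvAtA board rc.1 rc.2, rc)))).foldl
          (fun d p => PySem.Dict.modify d p.1 [] (fun x => x ++ [p.2])) PySem.Dict.empty) := by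
    rw [List.foldl_map]; rfl
  rw [h, PySem.Dict.getD_foldl_modify_append, PySem.Dict.getD_empty, List.filter_map, List.map_map]
  simp [Function.comp_def]

lemma pv_flatMap_ite (l : List Int) (p : Int → Prop) [DecidablePred p] (f : Int → Int × Int) :
    l.flatMap (fun x => if p x then [f x] else []) = (l.filter (fun x => decide (p x))).map f := by
  induction l with
  | nil => rfl
  | cons h t ih =>
    simp only [List.flatMap_cons, List.filter_cons, ih]
    by_cases hp : p h <;> simp [hp]

lemma pv_filter_pyRange_beq (N a : Int) :
    (PySem.List.pyRange 0 N 1).filter (· == a) = if 0 ≤ a ∧ a < N then [a] else [] := by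
  rw [List.filter_beq]
  by_cases h : 0 ≤ a ∧ a < N
  · rw [List.count_eq_one_of_mem (PySem.List.nodup_pyRange_one 0 N) (PySem.List.mem_pyRange_one.mpr h)]
    simp [h]
  · rw [List.count_eq_zero.mpr (fun hm => h (PySem.List.mem_pyRange_one.mp hm))]
    simp [h]

lemma pv_cells_filter (N : Int) (q : Int × Int → Bool) (t : Int → Int)
    (h : ∀ r c : Int, q (r, c) = (c == t r)) :
    (pvCells N).filter q
      = ((PySem.List.pyRange 0 N 1).filter (fun r => decide (0 ≤ t r ∧ t r < N))).map (fun r => (r, t r)) := by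
  unfold pvCells
  rw [List.filter_flatMap]
  have inner : ∀ r : Int, ((PySem.List.pyRange 0 N 1).map (fun c => (r, c))).filter q
      = if 0 ≤ t r ∧ t r < N then [(r, t r)] else [] := by
    intro r
    rw [List.filter_map]
    simp only [Function.comp_def]
    rw [List.filter_congr (fun c _ => h r c), pv_filter_pyRange_beq]
    split <;> simp
  simp only [inner]
  exact pv_flatMap_ite _ _ _

-- A's conditional two-list accumulation loop, in closed form
lemma pv_lineA_eq (board : List (List Int)) (N : Int) (t : Int → Int) :
    (PySem.List.pyRange 0 N 1).foldl (fun p r =>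
        if 0 ≤ t r ∧ t r < N then (p.1 ++ [pvAtA board r (t r)], p.2 ++ [(r, t r)]) else p) ([], [])
      = (((PySem.List.pyRange 0 N 1).filter (fun r => decide (0 ≤ t r ∧ t r < N))).map (fun r => pvAtA board r (t r)),
         ((PySem.List.pyRange 0 N 1).filter (fun r => decide (0 ≤ t r ∧ t r < N))).map (fun r => (r, t r))) := by
  rw [PySem.List.foldl_ite_eq_foldl_filter (fun r => 0 ≤ t r ∧ t r < N)
      (fun p r => (p.1 ++ [pvAtA board r (t r)], p.2 ++ [(r, t r)])),
    PySem.List.foldl_prod_mk (fun acc r => acc ++ [pvAtA board r (t r)]) (fun acc r => acc ++ [(r, t r)]),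
    PySem.List.foldl_append_singleton_eq_map, PySem.List.foldl_append_singleton_eq_map]
  simp

-- the key test of B's diagonal bucket, rephrased as 'c is determined by r'
lemma pv_key_diag (s r c : Int) : (r - c == s) = (c == r - s) := by
  rw [Bool.eq_iff_iff]; simp only [beq_iff_eq]; omega

lemma pv_key_anti (s r c : Int) : (r + c == s) = (c == s - r) := by
  rw [Bool.eq_iff_iff]; simp only [beq_iff_eq]; omega

-- ===== VERDICT (by name: the statement is the Claim_ definition above) =====
theorem all_lines_with_coords_spec : Claim_equal_all_lines_with_coords := by
  intro board _ _
  unfold Spec_all_lines_with_coords all_lines_with_coords all_lines_with_coords_alt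
  rw [pv_buckets_eq]
  congr 1
  · congr 1
    · congr 1
      · -- columns
        refine (List.map_congr_left ?_).symm
        intro c hc
        have hcN : 0 ≤ c ∧ c < (board.length : Int) := PySem.List.mem_pyRange_one.mp hc
        rw [pv_bkt_getD, pv_cells_filter (board.length : Int) _ (fun _ => c) (fun r c' => rfl)]
        rw [List.filter_eq_self.mpr (fun r _ => by simpa using hcN)]
        simp [pvSplit, List.map_map]
    · -- '\' diagonals
      refine List.filterMap_congr ?_
      intro s _
      have hA : pvDiagA board (board.length : Int) s
          = (((PySem.List.pyRange 0 (board.length : Int) 1).filter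
                (fun r => decide (0 ≤ r - s ∧ r - s < (board.length : Int)))).map (fun r => pvAtA board r (r - s)),
             ((PySem.List.pyRange 0 (board.length : Int) 1).filter
                (fun r => decide (0 ≤ r - s ∧ r - s < (board.length : Int)))).map (fun r => (r, r - s))) :=
        pv_lineA_eq board (board.length : Int) (fun r => r - s)
      have hB : PySem.Dict.getD (pvBkt board (fun rc => rc.1 - rc.2) (pvCells (board.length : Int))) s []
          = (((PySem.List.pyRange 0 (board.length : Int) 1).filter
                (fun r => decide (0 ≤ r - s ∧ r - s < (board.length : Int)))).map (fun r => (r, r - s))).map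
              (fun rc => (pvAtA board rc.1 rc.2, rc)) := by
        rw [pv_bkt_getD, pv_cells_filter (board.length : Int) _ (fun r => r - s) (fun r c => pv_key_diag s r c)]
      simp only [hA, hB, pvSplit, List.map_map, List.length_map]
      rfl
  · -- '/' anti-diagonals
    refine List.filterMap_congr ?_
    intro s _
    have hA : pvAntiA board (board.length : Int) s
        = (((PySem.List.pyRange 0 (board.length : Int) 1).filter
              (fun r => decide (0 ≤ s - r ∧ s - r < (board.length : Int)))).map (fun r => pvAtA board r (s - r)),
           ((PySem.List.pyRange 0 (board.length : Int) 1).filter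
              (fun r => decide (0 ≤ s - r ∧ s - r < (board.length : Int)))).map (fun r => (r, s - r))) :=
      pv_lineA_eq board (board.length : Int) (fun r => s - r)
    have hB : PySem.Dict.getD (pvBkt board (fun rc => rc.1 + rc.2) (pvCells (board.length : Int))) s []
        = (((PySem.List.pyRange 0 (board.length : Int) 1).filter
              (fun r => decide (0 ≤ s - r ∧ s - r < (board.length : Int)))).map (fun r => (r, s - r))).map
            (fun rc => (pvAtA board rc.1 rc.2, rc)) := by
      rw [pv_bkt_getD, pv_cells_filter (board.length : Int) _ (fun r => s - r) (fun r c => pv_key_anti s r c)]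
    simp only [hA, hB, pvSplit, List.map_map, List.length_map]
    rfl
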